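-- pv_equiv track=rewrite | github.com/U1805/Hare | webui.py | typer
-- ===== SOURCE A (Python) =====
-- def typer(text, num=35):
--     cnt = 1
--     s = ""
--     for word in text:
--         s = s+"{\\1a&HFF&\\3a&HFF&\\4a&HFF&}{\\t("+str(cnt*33)+","+str(cnt*33+1)+",\\1a&H00&\\3a&H00&\\4a&H00&)}"+word
--         if cnt % num == 0:
--             s += "\\N{\\fs 0}\\N"
--         cnt=cnt+1
--     return s
-- ===== SOURCE B (Python) =====
-- SEP = "\\N{\\fs 0}\\N"
--
-- def _piece(cnt, word):
--     t = cnt * 33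
--     return ("{\\1a&HFF&\\3a&HFF&\\4a&HFF&}{\\t(" + str(t) + "," + str(t + 1)
--             + ",\\1a&H00&\\3a&H00&\\4a&H00&)}" + word)
--
-- def typer(text, num=35):
--     words = list(text)
--     parts = []
--     for start in range(0, len(words), num):
--         chunk = words[start:start + num]
--         for j, word in enumerate(chunk):
--             parts.append(_piece(start + j + 1, word))
--         if len(chunk) == num:
--             parts.append(SEP)
--     return "".join(parts)
-- ===== Notes on version B (the rewrite author's own statement) =====
-- stated objective: faster
-- what changed: Replaces the single accumulating loop (running counter, modulus test, repeated quadratic string concatenation) by a chunked decomposition: the word list is split into consecutive chunks of size num, each chunk's words are formatted from the chunk's global offset, a separator is appended after every full chunk, and the result is assembled once with ''.join; …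
-- outside the precondition, e.g. on typer([], 0): A returns '', B raises ValueError
import Mathlib
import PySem

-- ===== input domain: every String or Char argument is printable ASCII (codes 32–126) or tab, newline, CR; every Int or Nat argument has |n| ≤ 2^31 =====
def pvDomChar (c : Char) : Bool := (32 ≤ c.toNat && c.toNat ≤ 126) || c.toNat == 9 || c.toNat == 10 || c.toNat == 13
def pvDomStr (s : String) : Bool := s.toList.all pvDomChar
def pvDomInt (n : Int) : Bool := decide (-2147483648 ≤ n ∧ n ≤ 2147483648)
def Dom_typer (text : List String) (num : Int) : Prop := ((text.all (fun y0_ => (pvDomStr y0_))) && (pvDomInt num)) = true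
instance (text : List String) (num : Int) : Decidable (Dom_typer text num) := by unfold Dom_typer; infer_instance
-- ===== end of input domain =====

-- B replaces A's single accumulating loop (running counter, modulus test, repeated string
-- concatenation) by a chunked decomposition: chunks of size num, separator after each full
-- chunk, one final join.

-- ===== PORT A =====
def typer (text : List String) (num : Int) : String :=
  (text.foldl (fun (st : Int × String) word =>
    let cnt := st.1
    let s := st.2 ++ "{\\1a&HFF&\\3a&HFF&\\4a&HFF&}{\\t(" ++ PySem.Int.toStr (cnt * 33) ++ ","
      ++ PySem.Int.toStr (cnt * 33 + 1) ++ ",\\1a&H00&\\3a&H00&\\4a&H00&)}" ++ word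
    let s := if PySem.Int.mod cnt num = 0 then s ++ "\\N{\\fs 0}\\N" else s
    (cnt + 1, s)) (1, "")).2

-- ===== PORT B =====
def sepB : String := "\\N{\\fs 0}\\N"

def pieceB (cnt : Int) (word : String) : String :=
  let t := cnt * 33
  "{\\1a&HFF&\\3a&HFF&\\4a&HFF&}{\\t(" ++ PySem.Int.toStr t ++ "," ++ PySem.Int.toStr (t + 1)
    ++ ",\\1a&H00&\\3a&H00&\\4a&H00&)}" ++ word

def typer_alt (text : List String) (num : Int) : String :=
  let words := text
  let parts : List String :=
    (PySem.List.pyRange 0 (words.length : Int) num).foldl (fun parts start =>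
      let chunk := PySem.List.slice words (some start) (some (start + num))
      let parts := parts ++ (PySem.List.enumerate chunk 0).map (fun p => pieceB (start + p.1 + 1) p.2)
      if (chunk.length : Int) = num then parts ++ [sepB] else parts) []
  String.join parts

-- ===== PRECONDITION & SPEC =====
-- Pre_ excludes num ≤ 0 on nonempty text and num = 0 on empty text: at num = 0 Python A raises
-- ZeroDivisionError on nonempty text and B's range(..., 0) raises ValueError on any text, and a
-- negative chunk size is outside the task's natural domain (A's separator placement there is an
-- artifact of Python's signed modulo, while B's chunking naturally yields the empty string).
def Pre_typer (text : List String) (num : Int) : Prop := 0 < num ∨ (text = [] ∧ num ≠ 0)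
instance (text : List String) (num : Int) : Decidable (Pre_typer text num) := by
  unfold Pre_typer; infer_instance
def pvWitness_typer : List String × Int := (["ab", "c", "d"], 2)

def Spec_typer (text : List String) (num : Int) (out : String) : Prop := out = typer_alt text num
instance (text : List String) (num : Int) (out : String) : Decidable (Spec_typer text num out) := by
  unfold Spec_typer; infer_instance

-- ===== CLAIM (what is proved, stated in full; the proofs are below) =====
def Claim_equal_typer : Prop := ∀ (text : List String) (num : Int), Dom_typer text num → Pre_typer text num → Spec_typer text num (typer text num)

-- ===== LEMMAS AND PROOFS =====

-- Common description of the output: one formatted piece per word at 1-based counter c,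
-- with the separator after each counter divisible by k.
def flatT (k : Int) : Int → List String → String
  | _, [] => ""
  | c, w :: ws => pieceB c w ++ (if c % k = 0 then sepB else "") ++ flatT k (c + 1) ws

theorem flatT_append (k c : Int) (xs ys : List String) :
    flatT k c (xs ++ ys) = flatT k c xs ++ flatT k (c + xs.length) ys := by
  induction xs generalizing c with
  | nil => simp [flatT]
  | cons x xs ih =>
      simp only [List.cons_append, flatT, ih (c + 1), List.length_cons]
      push_cast
      have h : c + ((xs.length : Int) + 1) = c + 1 + (xs.length : Int) := by ring
      rw [h]
      simp [String.append_assoc]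

theorem foldl_append_str (xs : List String) :
    ∀ (acc : String), List.foldl (fun r s => r ++ s) acc xs = acc ++ String.join xs := by
  induction xs with
  | nil => intro acc; simp [String.join]
  | cons x xs ih =>
      intro acc
      have hj : String.join (x :: xs) = x ++ String.join xs := by
        show List.foldl (fun r s => r ++ s) "" (x :: xs) = _
        simp only [List.foldl_cons, ih, String.empty_append]
      simp only [List.foldl_cons, ih, hj, String.append_assoc]

theorem join_cons_str (x : String) (xs : List String) :
    String.join (x :: xs) = x ++ String.join xs := by
  show List.foldl (fun r s => r ++ s) "" (x :: xs) = _
  simp only [List.foldl_cons, foldl_append_str, String.empty_append]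

theorem join_append_str (l1 l2 : List String) :
    String.join (l1 ++ l2) = String.join l1 ++ String.join l2 := by
  induction l1 with
  | nil => simp [String.join]
  | cons x xs ih =>
      simp only [List.cons_append, join_cons_str, ih, String.append_assoc]

-- A's fold computes flatT with k = |num| (cnt % num == 0 iff |num| divides cnt, for every num).
theorem typer_eq_flatT (num : Int) (l : List String) :
    ∀ (c : Int) (s : String),
    (l.foldl (fun (st : Int × String) word =>
      let cnt := st.1
      let s := st.2 ++ "{\\1a&HFF&\\3a&HFF&\\4a&HFF&}{\\t(" ++ PySem.Int.toStr (cnt * 33) ++ ","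
        ++ PySem.Int.toStr (cnt * 33 + 1) ++ ",\\1a&H00&\\3a&H00&\\4a&H00&)}" ++ word
      let s := if PySem.Int.mod cnt num = 0 then s ++ "\\N{\\fs 0}\\N" else s
      (cnt + 1, s)) (c, s)).2 = s ++ flatT |num| c l := by
  induction l with
  | nil => intro c s; simp [flatT]
  | cons w ws ih =>
      intro c s
      simp only [List.foldl_cons]
      rw [ih]
      have hmod : (PySem.Int.mod c num = 0) = (c % |num| = 0) := by
        simp [PySem.Int.mod_eq_zero_iff_dvd]
      simp only [flatT, pieceB, hmod]
      split_ifs with h <;>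
        simp [sepB, String.append_assoc, String.append_empty]

-- pyRange with a positive step unfolds one element at a time.
theorem pyRange_pos_cons (a b s : Int) (hs : 0 < s) (hab : a < b) :
    PySem.List.pyRange a b s = a :: PySem.List.pyRange (a + s) b s := by
  rw [PySem.List.pyRange_of_pos _ _ hs, PySem.List.pyRange_of_pos _ _ hs]
  rw [if_pos hab]
  have hnum : b - a + s - 1 = (b - a - 1) + 1 * s := by ring
  have hdiv : (b - a + s - 1) / s = (b - a - 1) / s + 1 := by
    rw [hnum, Int.add_mul_ediv_right _ _ (by omega : s ≠ 0)]
  have hnn : 0 ≤ (b - a - 1) / s := Int.ediv_nonneg (by omega) (by omega)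
  have htn : ((b - a + s - 1) / s).toNat = ((b - a - 1) / s).toNat + 1 := by omega
  rw [htn, List.range_succ_eq_map, List.map_cons, List.map_map]
  congr 1
  · simp
  · by_cases hb : a + s < b
    · rw [if_pos hb]
      have : b - (a + s) + s - 1 = b - a - 1 := by ring
      rw [this]
      apply List.map_congr_left
      intro k _
      simp only [Function.comp_apply]
      push_cast
      ring
    · rw [if_neg hb]
      have hz : (b - a - 1) / s = 0 := Int.ediv_eq_zero_of_lt (by omega) (by omega)
      simp [hz]

-- flatT over one chunk entered at in-chunk offset j: the separator fires exactly at a full chunk end.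
theorem flatT_chunk (kn : Nat) (_hk : 0 < kn) (chunk : List String) (q : Nat) :
    ∀ (j : Nat), chunk.length + j ≤ kn → j < kn →
    flatT (kn : Int) (((q * kn : Nat) : Int) + (j : Int) + 1) chunk =
      String.join ((PySem.List.enumerate chunk (j : Int)).map
        (fun p => pieceB (((q * kn : Nat) : Int) + p.1 + 1) p.2))
        ++ (if j + chunk.length = kn then sepB else "") := by
  induction chunk with
  | nil =>
      intro j _ hj
      simp [flatT, PySem.List.enumerate, String.join]
      omega
  | cons w ws ih =>
      intro j hlen hj
      have hcond : ((((q * kn : Nat) : Int) + (j : Int) + 1) % (kn : Int) = 0) ↔ (j + 1 = kn) := by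
        have h1 : (((q * kn : Nat) : Int) + (j : Int) + 1) = ((q * kn + (j + 1) : Nat) : Int) := by
          push_cast; ring
        rw [h1, ← Int.natCast_emod, Nat.cast_eq_zero, Nat.mul_comm q kn, Nat.mul_add_mod]
        constructor
        · intro h
          by_contra hne
          rw [Nat.mod_eq_of_lt (by omega)] at h
          omega
        · intro h; rw [h, Nat.mod_self]
      simp only [flatT, PySem.List.enumerate_cons, List.map_cons, join_cons_str]
      by_cases hcase : j + 1 = kn
      · have hws : ws = [] := by
          have := hlen
          simp only [List.length_cons] at this
          have : ws.length = 0 := by omega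
          exact List.eq_nil_of_length_eq_zero this
        subst hws
        rw [if_pos (hcond.mpr hcase)]
        simp only [flatT, PySem.List.enumerate_nil, List.map_nil, List.length_cons,
          List.length_nil, String.join]
        have : j + (0 + 1) = kn := by omega
        rw [if_pos this]
        simp [String.append_empty]
      · rw [if_neg (fun h => hcase (hcond.mp h))]
        have hc2 : (((q * kn : Nat) : Int) + (j : Int) + 1) + 1
            = ((q * kn : Nat) : Int) + ((j + 1 : Nat) : Int) + 1 := by push_cast; ring
        rw [hc2, ih (j + 1) (by simp at hlen ⊢; omega) (by omega)]
        have hcast : ((j : Int) + 1) = ((j + 1 : Nat) : Int) := by push_cast; ring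
        rw [hcast]
        have hifeq : (if j + 1 + ws.length = kn then sepB else "")
            = (if j + (w :: ws).length = kn then sepB else "") := by
          simp only [List.length_cons]
          congr 1
          exact propext (by constructor <;> omega)
        rw [hifeq]
        simp [String.append_assoc]

theorem outer_nil (kn : Nat) (hk : 0 < kn) (words : List String) (q : Nat)
    (hge : words.length ≤ q * kn) :
    String.join ((PySem.List.pyRange ((q * kn : Nat) : Int) (words.length : Int) (kn : Int)).flatMap
      (fun start =>
        (PySem.List.enumerate (PySem.List.slice words (some start) (some (start + (kn : Int)))) 0).map
          (fun p => pieceB (start + p.1 + 1) p.2)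
        ++ (if (((PySem.List.slice words (some start) (some (start + (kn : Int)))).length : Int) = (kn : Int))
            then [sepB] else [])))
      = flatT (kn : Int) (((q * kn : Nat) : Int) + 1) (words.drop (q * kn)) := by
  have hnil : PySem.List.pyRange ((q * kn : Nat) : Int) (words.length : Int) (kn : Int) = [] := by
    rw [PySem.List.pyRange_of_pos _ _ (by exact_mod_cast hk)]
    rw [if_neg (by push_cast; omega)]
    simp
  rw [hnil, List.drop_eq_nil_of_le hge]
  simp [flatT, String.join]

theorem join_ite_sep (c : Prop) [Decidable c] :
    String.join (if c then [sepB] else []) = if c then sepB else "" := by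
  split_ifs <;> simp [String.join]

theorem outer_chunks (kn : Nat) (hk : 0 < kn) (words : List String) :
    ∀ (r q : Nat), words.length ≤ q * kn + r →
    String.join ((PySem.List.pyRange ((q * kn : Nat) : Int) (words.length : Int) (kn : Int)).flatMap
      (fun start =>
        (PySem.List.enumerate (PySem.List.slice words (some start) (some (start + (kn : Int)))) 0).map
          (fun p => pieceB (start + p.1 + 1) p.2)
        ++ (if (((PySem.List.slice words (some start) (some (start + (kn : Int)))).length : Int) = (kn : Int))
            then [sepB] else [])))
      = flatT (kn : Int) (((q * kn : Nat) : Int) + 1) (words.drop (q * kn)) := by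
  intro r
  induction r with
  | zero =>
      intro q hle
      exact outer_nil kn hk words q (by omega)
  | succ r ihr =>
      intro q hle
      by_cases hlt : q * kn < words.length
      · have hcons := pyRange_pos_cons ((q * kn : Nat) : Int) (words.length : Int) (kn : Int)
          (by exact_mod_cast hk) (by exact_mod_cast hlt)
        rw [hcons, List.flatMap_cons, join_append_str, join_append_str, join_ite_sep]
        have hchunk : PySem.List.slice words (some ((q * kn : Nat) : Int))
            (some (((q * kn : Nat) : Int) + (kn : Int))) = (words.drop (q * kn)).take kn :=
          PySem.List.slice_natCast_add words (q * kn) kn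
        rw [hchunk]
        have hlentake : ((words.drop (q * kn)).take kn).length = min kn (words.length - q * kn) := by
          simp
        -- the peeled chunk equals flatT over the chunk (offset 0)
        have hflat := flatT_chunk kn hk ((words.drop (q * kn)).take kn) q 0
          (by rw [Nat.add_zero, hlentake]; omega) hk
        simp only [Nat.cast_zero, add_zero, zero_add] at hflat
        -- the tail range starts at (q+1)*kn
        have hstart : ((q * kn : Nat) : Int) + (kn : Int) = (((q + 1) * kn : Nat) : Int) := by
          push_cast; ring
        rw [hstart, ihr (q + 1) (by omega)]
        -- split the remaining words at the chunk boundary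
        have hsplit : words.drop (q * kn)
            = (words.drop (q * kn)).take kn ++ words.drop ((q + 1) * kn) := by
          have h1 : (words.drop (q * kn)).drop kn = words.drop ((q + 1) * kn) := by
            rw [List.drop_drop]
            congr 1
            ring
          rw [← h1, List.take_append_drop]
        conv_rhs => rw [hsplit]
        rw [flatT_append]
        simp only [Nat.cast_inj]
        rw [← hflat]
        by_cases hfull : q * kn + kn ≤ words.length
        · have hlen' : ((words.drop (q * kn)).take kn).length = kn := by
            rw [hlentake]; omega
          rw [hlen']
          have hcnt : ((q * kn : Nat) : Int) + 1 + (kn : Int) = (((q + 1) * kn : Nat) : Int) + 1 := by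
            push_cast; ring
          rw [hcnt]
        · have hdropnil : words.drop ((q + 1) * kn) = [] :=
            List.drop_eq_nil_of_le (by omega)
          rw [hdropnil]
          simp [flatT]
      · exact outer_nil kn hk words q (by omega)

theorem foldl_ite_append {A B : Type} (f : A → List B) (c : A → Prop) [DecidablePred c] (x : B) :
    ∀ (l : List A) (acc : List B),
    l.foldl (fun acc a => if c a then (acc ++ f a) ++ [x] else acc ++ f a) acc
      = acc ++ l.flatMap (fun a => f a ++ if c a then [x] else []) := by
  intro l
  induction l with
  | nil => intro acc; simp
  | cons a l ih =>
      intro acc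
      simp only [List.foldl_cons, List.flatMap_cons, ih]
      split_ifs <;> simp

-- ===== VERDICT (by name: the statement is the Claim_ definition above) =====
theorem typer_spec : Claim_equal_typer := by
  intro text num _ hpre
  show typer text num = typer_alt text num
  by_cases htext : text = []
  · subst htext
    unfold typer typer_alt
    simp [PySem.List.pyRange, String.join]
  · have hnum : 0 < num := by
      rcases hpre with h | ⟨h, _⟩
      · exact h
      · exact absurd h htext
    unfold typer typer_alt
    rw [typer_eq_flatT, String.empty_append, abs_of_pos hnum]
    simp only []
    have hkn : ((num.toNat : Nat) : Int) = num := Int.toNat_of_nonneg (le_of_lt hnum)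
    have hkpos : 0 < num.toNat := by omega
    rw [foldl_ite_append
      (fun start => (PySem.List.enumerate (PySem.List.slice text (some start) (some (start + num))) 0).map
        (fun p => pieceB (start + p.1 + 1) p.2))
      (fun start => (((PySem.List.slice text (some start) (some (start + num))).length : Int) = num))
      sepB]
    rw [List.nil_append]
    have houter := outer_chunks (num.toNat) hkpos text text.length 0 (by omega)
    simp only [Nat.zero_mul, Nat.cast_zero, List.drop_zero, hkn, zero_add] at houter
    exact houter.symm
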